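-- pv_equiv track=rewrite | github.com/vadmium/python-lib | net.py | header_unquote
-- ===== SOURCE A (Python) =====
-- def header_unquote(header):
--     segments = list()
--     while header:  # For each quoted segment
--         [unquoted, _, header] = header.partition('"')
--         segments.append(unquoted)
--
--         sentinelled = header + '"\\'
--         start = 0
--         pos = 0
--         while True:  # For each backslash escape in quote
--             quote = sentinelled.index('"', pos)
--             backslash = sentinelled.index("\\", pos)
--             if quote < backslash:
--                 break
--             segments.append(header[start:backslash])
--             start = min(backslash + 1, len(header))
--             pos = min(start + 2, len(header))
--         segments.append(header[start:quote])
--         header = header[quote + 1:]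
--     return "".join(segments)
-- ===== SOURCE B (Python) =====
-- def header_unquote(header):
--     out = []
--     escaped = False
--     quoted = False
--     for c in header:
--         if escaped:
--             out.append(c)
--             escaped = False
--         elif quoted:
--             if c == "\\":
--                 escaped = True
--             elif c == '"':
--                 quoted = False
--             else:
--                 out.append(c)
--         elif c == '"':
--             quoted = True
--         else:
--             out.append(c)
--     return "".join(out)
-- ===== Notes on version B (the rewrite author's own statement) =====
-- stated objective: simpler
-- what changed: Replaces A's repeated partition/index/slice scanning with a single left-to-right state machine tracking quote and escape state; this also fixes A's off-by-one (scan resumed at start+2 instead of start+1) that makes the character right after an escaped character never be recognized as a quote or backslash.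
-- intended difference: On headers where, inside a quoted section, a backslash escape is immediately followed (two positions after the backslash) by another quote or backslash character, A resumes scanning one character too late and copies that delimiter literally into the output, while B treats it as the closing quote or the next escape, which is the intended unquoting. — e.g. on header_unquote("\"\\a\""): A returns "a\"", B returns "a"
import Mathlib
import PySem

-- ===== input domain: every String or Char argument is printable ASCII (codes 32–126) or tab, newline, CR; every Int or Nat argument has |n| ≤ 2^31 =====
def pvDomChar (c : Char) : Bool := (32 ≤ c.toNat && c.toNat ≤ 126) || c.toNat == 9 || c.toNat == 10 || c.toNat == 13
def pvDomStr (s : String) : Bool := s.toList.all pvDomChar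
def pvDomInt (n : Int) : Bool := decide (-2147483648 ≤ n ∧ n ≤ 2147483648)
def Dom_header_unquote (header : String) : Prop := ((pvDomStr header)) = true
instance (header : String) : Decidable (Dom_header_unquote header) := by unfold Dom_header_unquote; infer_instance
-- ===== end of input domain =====

-- B is the plain one-char-escape quote scanner; it is simpler than A's partition/index/slice loops and
-- fixes A's off-by-one escape skip (see D_ below). Return-value equivalence outside D_ only; no mutation involved.

-- ===== PORT A =====

-- Python sentinelled.index(c, pos): exact here because in A the sentinel guarantees c occurs at or after pos
def pyIndexFrom (l : List Char) (c : Char) (pos : Nat) : Nat :=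
  pos + (l.drop pos).findIdx (· == c)

-- Python h[a:b] for the nonnegative indices A uses (clamped like Python)
def sliceNN (l : List Char) (a b : Nat) : List Char := (l.take b).drop a

-- Python header.partition('"'), keeping only the pieces A uses (before, after); exact for the 1-char separator
def partQuote (l : List Char) : List Char × List Char :=
  let i := l.findIdx (· == '"')
  if i < l.length then (l.take i, l.drop (i + 1)) else (l, [])

-- the inner `while True` loop of A; fuel is a totality guard only (pos strictly advances, so
-- the h.length + 2 supplied at the call site is never exhausted)
def innerA (h : List Char) : Nat → Nat → Nat → List (List Char) → List (List Char) × Nat × Nat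
  | 0, start, pos, segs => (segs, start, pos)
  | fuel + 1, start, pos, segs =>
    let s := h ++ ['"', '\\']
    let quote := pyIndexFrom s '"' pos
    let backslash := pyIndexFrom s '\\' pos
    if quote < backslash then (segs, start, quote)
    else
      let start' := min (backslash + 1) h.length
      innerA h fuel start' (min (start' + 2) h.length) (segs ++ [sliceNN h start backslash])

-- the outer `while header` loop of A; fuel is a totality guard only (the remaining header gets
-- strictly shorter each pass, so the header.length + 1 supplied at the call site is never exhausted)
def outerA : Nat → List Char → List (List Char) → List (List Char)
  | 0, _, segs => segs
  | fuel + 1, h, segs =>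
    if h = [] then segs
    else
      let p := partQuote h
      let segs1 := segs ++ [p.1]
      let r := innerA p.2 (p.2.length + 2) 0 0 segs1
      outerA fuel (p.2.drop (r.2.2 + 1)) (r.1 ++ [sliceNN p.2 r.2.1 r.2.2])

def header_unquote (header : String) : String :=
  String.ofList (outerA (header.toList.length + 1) header.toList []).flatten

-- ===== PORT B =====

-- one step of B's for-loop; state = (out, escaped, quoted)
def stepB (st : List Char × Bool × Bool) (c : Char) : List Char × Bool × Bool :=
  match st with
  | (out, escaped, quoted) =>
    if escaped then (out ++ [c], false, quoted)
    else if quoted then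
      if c = '\\' then (out, true, quoted)
      else if c = '"' then (out, false, false)
      else (out ++ [c], false, quoted)
    else if c = '"' then (out, false, true)
    else (out ++ [c], false, false)

def header_unquote_alt (header : String) : String :=
  String.ofList (header.toList.foldl stepB ([], false, false)).1

-- ===== PRECONDITION & SPEC =====

-- scans the input tracking the intended quote state; true iff some backslash escape inside a quoted
-- section is immediately followed (two positions after the backslash) by another quote or backslash
def dscan : List Char → Bool → Bool
  | '\\' :: _ :: r, true => ['"', '\\'].contains (r.headD 'x') || dscan r true
  | c :: r, q => dscan r (q.xor (c == '"'))
  | _, _ => false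

-- On headers where, inside a quoted section, a backslash escape is immediately followed (two positions
-- after the backslash) by another quote or backslash character, A's scan resumes one character too late
-- (pos = start+2) and copies that delimiter literally into the output; B treats it as the closing quote
-- or the next escape, which is the intended unquoting.
def D_header_unquote (header : String) : Prop := dscan header.toList false = true
instance (header : String) : Decidable (D_header_unquote header) := by unfold D_header_unquote; infer_instance

def Spec_header_unquote (header : String) (out : String) : Prop :=
  ¬ D_header_unquote header → out = header_unquote_alt header
instance (header : String) (out : String) : Decidable (Spec_header_unquote header out) := by unfold Spec_header_unquote; infer_instance

def pvDiffWitness_header_unquote : String := "\"\\a\""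
def pvDiffWitnessOut_header_unquote : String × String := ("a\"", "a")

-- ===== CLAIM (what is proved, stated in full; the proofs are below) =====
def Claim_unchanged_header_unquote : Prop := ∀ (header : String), Dom_header_unquote header → Spec_header_unquote header (header_unquote header)
def Claim_changed_header_unquote : Prop := Dom_header_unquote (pvDiffWitness_header_unquote) ∧ D_header_unquote (pvDiffWitness_header_unquote) ∧ header_unquote (pvDiffWitness_header_unquote) = pvDiffWitnessOut_header_unquote.1 ∧ header_unquote_alt (pvDiffWitness_header_unquote) = pvDiffWitnessOut_header_unquote.2 ∧ pvDiffWitnessOut_header_unquote.1 ≠ pvDiffWitnessOut_header_unquote.2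

-- ===== LEMMAS AND PROOFS =====

-- the intended scan, phrased recursively: (inside-quote output, remainder after the closing quote)
def insideSplit : List Char → List Char × List Char
  | [] => ([], [])
  | '"' :: r => ([], r)
  | '\\' :: [] => ([], [])
  | '\\' :: d :: r2 => (d :: (insideSplit r2).1, (insideSplit r2).2)
  | c :: r => (c :: (insideSplit r).1, (insideSplit r).2)

@[simp] theorem insideSplit_nil : insideSplit [] = ([], []) := rfl
@[simp] theorem insideSplit_quote (r : List Char) : insideSplit ('"' :: r) = ([], r) := by
  simp [insideSplit]
@[simp] theorem insideSplit_bs_nil : insideSplit ['\\'] = ([], []) := by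
  simp [insideSplit]
@[simp] theorem insideSplit_bs_cons (d : Char) (r2 : List Char) :
    insideSplit ('\\' :: d :: r2) = (d :: (insideSplit r2).1, (insideSplit r2).2) := by
  simp [insideSplit]
theorem insideSplit_other (c : Char) (r : List Char) (h1 : c ≠ '"') (h2 : c ≠ '\\') :
    insideSplit (c :: r) = (c :: (insideSplit r).1, (insideSplit r).2) := by
  simp [insideSplit, h1, h2]

theorem insideSplit_len_aux : ∀ (n : Nat) (l : List Char), l.length ≤ n →
    (insideSplit l).2.length ≤ l.length := by
  intro n
  induction n with
  | zero =>
    intro l h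
    have : l = [] := List.length_eq_zero_iff.mp (Nat.le_zero.mp h)
    subst this; simp
  | succ n ih =>
    intro l hl
    match l with
    | [] => simp
    | c :: r =>
      by_cases hq : c = '"'
      · subst hq; simp
      · by_cases hb : c = '\\'
        · subst hb
          match r with
          | [] => simp
          | d :: r2 =>
            have := ih r2 (by simp at hl; omega)
            simp; omega
        · rw [insideSplit_other c r hq hb]
          have := ih r (by simp at hl; omega)
          simp; omega

theorem insideSplit_len (l : List Char) : (insideSplit l).2.length ≤ l.length :=
  insideSplit_len_aux l.length l le_rfl

def oScan : List Char → List Char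
  | [] => []
  | c :: r =>
    if c = '"' then (insideSplit r).1 ++ oScan (insideSplit r).2 else c :: oScan r
  termination_by l => l.length
  decreasing_by
    · have := insideSplit_len r; simpa using Nat.lt_succ_of_le this
    · simp

-- equation lemmas for dscan in the inside-quote state
@[simp] theorem dscan_nil (b : Bool) : dscan [] b = false := rfl
theorem dscan_false_cons (c : Char) (r : List Char) :
    dscan (c :: r) false = if c = '"' then dscan r true else dscan r false := by
  by_cases h : c = '"'
  · subst h; simp [dscan]
  · have h' : (c == '"') = false := by simp [h]
    simp [dscan, h, h']
theorem dscan_true_quote (r : List Char) : dscan ('"' :: r) true = dscan r false := by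
  simp [dscan]
theorem dscan_true_other (c : Char) (r : List Char) (h1 : c ≠ '"') (h2 : c ≠ '\\') :
    dscan (c :: r) true = dscan r true := by
  have h' : (c == '"') = false := by simp [h1]
  simp [dscan, h1, h2, h']
@[simp] theorem dscan_true_bs_nil : dscan ['\\'] true = false := by
  simp [dscan]
@[simp] theorem dscan_true_bs_one (d : Char) : dscan ['\\', d] true = false := by
  simp [dscan]
theorem dscan_true_bs_cons (d e : Char) (r3 : List Char) :
    dscan ('\\' :: d :: e :: r3) true = ((e == '"' || e == '\\') || dscan (e :: r3) true) := by
  simp [dscan, Bool.beq_eq_decide_eq]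

-- B's scanner as a structural recursion on (escaped, quoted)
def scanS : List Char → Bool → Bool → List Char
  | [], _, _ => []
  | c :: r, true, q => c :: scanS r false q
  | '\\' :: r, false, true => scanS r true true
  | '"' :: r, false, true => scanS r false false
  | c :: r, false, true => c :: scanS r false true
  | '"' :: r, false, false => scanS r false true
  | c :: r, false, false => c :: scanS r false false

theorem foldl_stepB : ∀ (l : List Char) (out : List Char) (e q : Bool),
    (l.foldl stepB (out, e, q)).1 = out ++ scanS l e q := by
  intro l
  induction l with
  | nil => intro out e q; simp [scanS]
  | cons c r ih =>
    intro out e q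
    cases e <;> cases q <;> by_cases hc : c = '"' <;> by_cases hb : c = '\\' <;>
      simp_all [stepB, scanS]

theorem scanS_inside : ∀ (n : Nat) (l : List Char), l.length ≤ n →
    scanS l false true = (insideSplit l).1 ++ scanS (insideSplit l).2 false false := by
  intro n
  induction n with
  | zero =>
    intro l h
    have : l = [] := List.length_eq_zero_iff.mp (Nat.le_zero.mp h)
    subst this; simp [scanS]
  | succ n ih =>
    intro l hl
    match l with
    | [] => simp [scanS]
    | c :: r =>
      by_cases hq : c = '"'
      · subst hq; simp [scanS]
      · by_cases hb : c = '\\'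
        · subst hb
          match r with
          | [] => simp [scanS]
          | d :: r2 =>
            have h2 : r2.length ≤ n := by simp at hl; omega
            simp [scanS, ih r2 h2]
        · have h2 : r.length ≤ n := by simp at hl; omega
          simp [scanS, hq, hb, insideSplit_other c r hq hb, ih r h2]

theorem scanS_outside : ∀ (n : Nat) (l : List Char), l.length ≤ n →
    scanS l false false = oScan l := by
  intro n
  induction n with
  | zero =>
    intro l h
    have : l = [] := List.length_eq_zero_iff.mp (Nat.le_zero.mp h)
    subst this; simp [scanS, oScan]
  | succ n ih =>
    intro l hl
    match l with
    | [] => simp [scanS, oScan]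
    | c :: r =>
      by_cases hq : c = '"'
      · subst hq
        have e1 : scanS ('"' :: r) false false = scanS r false true := by simp [scanS]
        rw [e1, scanS_inside r.length r le_rfl,
          ih (insideSplit r).2 (by have := insideSplit_len r; simp at hl; omega), oScan]
        simp
      · rw [oScan]
        have h2 : r.length ≤ n := by simp at hl; omega
        simp [scanS, hq, ih r h2]

-- delimiter-free prefixes pass through everything unchanged
def NoDelim (u : List Char) : Prop := ∀ c ∈ u, c ≠ '"' ∧ c ≠ '\\'

theorem insideSplit_append_nodelim : ∀ (u v : List Char), NoDelim u →
    insideSplit (u ++ v) = (u ++ (insideSplit v).1, (insideSplit v).2) := by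
  intro u
  induction u with
  | nil => intro v _; simp
  | cons c u ih =>
    intro v hnd
    have hc := hnd c (by simp)
    have hu : NoDelim u := fun x hx => hnd x (by simp [hx])
    rw [List.cons_append, insideSplit_other c (u ++ v) hc.1 hc.2, ih v hu]
    simp

theorem dscan_append_nodelim : ∀ (u v : List Char), NoDelim u →
    dscan (u ++ v) true = dscan v true := by
  intro u
  induction u with
  | nil => intro v _; simp
  | cons c u ih =>
    intro v hnd
    have hc := hnd c (by simp)
    have hu : NoDelim u := fun x hx => hnd x (by simp [hx])
    rw [List.cons_append, dscan_true_other c (u ++ v) hc.1 hc.2, ih v hu]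

theorem findIdx_append_nodelim (p : Char → Bool) (u v : List Char)
    (h : ∀ c ∈ u, p c = false) : (u ++ v).findIdx p = u.length + v.findIdx p := by
  induction u with
  | nil => simp
  | cons c u ih =>
    have := h c (by simp)
    simp [List.findIdx_cons, this, ih (fun x hx => h x (by simp [hx]))]
    omega

-- every list is either delimiter-free or splits at its first delimiter
theorem first_delim (t : List Char) :
    NoDelim t ∨ ∃ u d v, t = u ++ d :: v ∧ NoDelim u ∧ (d = '"' ∨ d = '\\') := by
  induction t with
  | nil => left; intro c hc; simp at hc
  | cons c t ih =>
    by_cases hc : c = '"' ∨ c = '\\'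
    · right; exact ⟨[], c, t, by simp, fun x hx => by simp at hx, hc⟩
    · push_neg at hc
      rcases ih with h | ⟨u, d, v, rfl, hu, hd⟩
      · left
        intro x hx
        rcases List.mem_cons.mp hx with rfl | hx
        · exact hc
        · exact h x hx
      · right
        refine ⟨c :: u, d, v, by simp, ?_, hd⟩
        intro x hx
        rcases List.mem_cons.mp hx with rfl | hx
        · exact hc
        · exact hu x hx

-- the inner-loop invariant: A's inner loop, run under the no-skip hypothesis, produces exactly the
-- intended inside-quote output and remainder
theorem drop_append_len {α : Type} (u w : List α) (m : Nat) :
    (u ++ w).drop (u.length + m) = w.drop m := by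
  rw [List.drop_append]
  simp

theorem inner_spec : ∀ (fuel : Nat) (h : List Char) (start pos : Nat) (segs : List (List Char)),
    start ≤ pos → pos ≤ h.length → h.length - pos < fuel →
    dscan (h.drop pos) true = false →
    ((innerA h fuel start pos segs).1 ++ [sliceNN h (innerA h fuel start pos segs).2.1 (innerA h fuel start pos segs).2.2]).flatten
        = segs.flatten ++ (h.drop start).take (pos - start) ++ (insideSplit (h.drop pos)).1
      ∧ h.drop ((innerA h fuel start pos segs).2.2 + 1) = (insideSplit (h.drop pos)).2 := by
  intro fuel
  induction fuel with
  | zero => intro h start pos segs _ _ hfl _; omega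
  | succ n ih =>
    intro h start pos segs hsp hpl hfl hds
    have hts : (h ++ ['"', '\\']).drop pos = h.drop pos ++ ['"', '\\'] :=
      List.drop_append_of_le_length hpl
    have hlt : (h.drop pos).length = h.length - pos := List.length_drop
    have hslice : ∀ X : Nat, sliceNN h start X = (h.drop start).take (X - start) := by
      intro X; unfold sliceNN; rw [List.drop_take]
    have hEsplit : ∀ m : Nat,
        (h.drop start).take ((pos - start) + m)
          = (h.drop start).take (pos - start) ++ (h.drop pos).take m := by
      intro m
      rw [List.take_add]
      congr 2
      rw [List.drop_drop]
      congr 1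
      omega
    rcases first_delim (h.drop pos) with hnd | ⟨u, d, v, htuv, hu, hdel⟩
    · -- no delimiter before the sentinel: the loop breaks at the sentinel quote
      have hq : pyIndexFrom (h ++ ['"', '\\']) '"' pos = pos + (h.length - pos) := by
        unfold pyIndexFrom
        rw [hts, findIdx_append_nodelim _ _ _ (fun c hc => by
          simpa using (hnd c hc).1)]
        simp [List.findIdx_cons, hlt]
      have hb : pyIndexFrom (h ++ ['"', '\\']) '\\' pos = pos + (h.length - pos) + 1 := by
        unfold pyIndexFrom
        rw [hts, findIdx_append_nodelim _ _ _ (fun c hc => by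
          simpa using (hnd c hc).2)]
        simp [List.findIdx_cons, hlt]
        omega
      have hins : insideSplit (h.drop pos) = (h.drop pos, []) := by
        have := insideSplit_append_nodelim (h.drop pos) [] hnd
        simpa using this
      simp only [innerA, hq, hb]
      rw [if_pos (by omega)]
      refine ⟨?_, ?_⟩
      · simp only [List.flatten_append, List.flatten_cons, List.flatten_nil, hins,
          List.append_nil, hslice]
        have h1 : pos + (h.length - pos) - start = (pos - start) + (h.length - pos) := by omega
        rw [h1, hEsplit]
        have h2 : (h.drop pos).take (h.length - pos) = h.drop pos := by
          rw [← hlt]; exact List.take_length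
        rw [h2]
        simp [List.append_assoc]
      · rw [hins]
        show h.drop (pos + (h.length - pos) + 1) = []
        exact List.drop_eq_nil_of_le (by omega)
    · have hlen : h.length = pos + u.length + 1 + v.length := by
        rw [htuv] at hlt; simp at hlt; omega
      have huq : ∀ c ∈ u, ((· == '"') c) = false := fun c hc => by
        simpa using (hu c hc).1
      have hub : ∀ c ∈ u, ((· == '\\') c) = false := fun c hc => by
        simpa using (hu c hc).2
      have htakeu : (h.drop pos).take u.length = u := by
        rw [htuv]; simp
      rcases hdel with rfl | rfl
      · -- first delimiter is '"': break
        have hq : pyIndexFrom (h ++ ['"', '\\']) '"' pos = pos + u.length := by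
          unfold pyIndexFrom
          rw [hts, htuv, List.append_assoc, List.cons_append,
            findIdx_append_nodelim _ _ _ huq]
          simp [List.findIdx_cons]
        have hb : ∃ k, pyIndexFrom (h ++ ['"', '\\']) '\\' pos = pos + u.length + 1 + k := by
          refine ⟨(v ++ ['"', '\\']).findIdx (· == '\\'), ?_⟩
          unfold pyIndexFrom
          rw [hts, htuv, List.append_assoc, List.cons_append,
            findIdx_append_nodelim _ _ _ hub]
          simp [List.findIdx_cons]
          omega
        obtain ⟨k, hb⟩ := hb
        have hins : insideSplit (h.drop pos) = (u, v) := by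
          rw [htuv, insideSplit_append_nodelim u _ hu]
          simp
        simp only [innerA, hq, hb]
        rw [if_pos (by omega)]
        refine ⟨?_, ?_⟩
        · simp only [List.flatten_append, List.flatten_cons, List.flatten_nil, hins,
            List.append_nil, hslice]
          have h1 : pos + u.length - start = (pos - start) + u.length := by omega
          rw [h1, hEsplit, htakeu]
          simp [List.append_assoc]
        · rw [hins]
          show h.drop (pos + u.length + 1) = v
          rw [show pos + u.length + 1 = pos + (u.length + 1) from by omega,
            ← List.drop_drop, htuv,
            show u.length + 1 = u.length + 1 from rfl]
          exact (by simpa using drop_append_len u ('"' :: v) 1)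
      · -- first delimiter is '\\': one escape step, then the induction hypothesis
        have hB : pos + u.length < h.length := by omega
        have hb : pyIndexFrom (h ++ ['"', '\\']) '\\' pos = pos + u.length := by
          unfold pyIndexFrom
          rw [hts, htuv, List.append_assoc, List.cons_append,
            findIdx_append_nodelim _ _ _ hub]
          simp [List.findIdx_cons]
        have hq : ∃ k, pyIndexFrom (h ++ ['"', '\\']) '"' pos = pos + u.length + 1 + k := by
          refine ⟨(v ++ ['"', '\\']).findIdx (· == '"'), ?_⟩
          unfold pyIndexFrom
          rw [hts, htuv, List.append_assoc, List.cons_append,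
            findIdx_append_nodelim _ _ _ huq]
          simp [List.findIdx_cons]
          omega
        obtain ⟨k, hq⟩ := hq
        have hstart' : min (pos + u.length + 1) h.length = pos + u.length + 1 := by omega
        have hvdrop : h.drop (pos + u.length + 1) = v := by
          rw [show pos + u.length + 1 = pos + (u.length + 1) from by omega,
            ← List.drop_drop, htuv]
          simpa using drop_append_len u ('\\' :: v) 1
        have hdsv : dscan ('\\' :: v) true = false := by
          rw [htuv, dscan_append_nodelim u _ hu] at hds
          exact hds
        have hBs : (h.drop start).take (pos + u.length - start)
            = (h.drop start).take (pos - start) ++ u := by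
          rw [show pos + u.length - start = (pos - start) + u.length from by omega,
            hEsplit, htakeu]
        have hssegs : ∀ X : List (List Char), (segs ++ [sliceNN h start (pos + u.length)]).flatten ++ X.flatten
            = segs.flatten ++ ((h.drop start).take (pos - start) ++ u) ++ X.flatten := by
          intro X
          simp [hslice, hBs]
        simp only [innerA, hq, hb]
        rw [if_neg (by omega), hstart']
        match v, hvdrop, hdsv, hlen with
        | [], hvdrop, _, hlen =>
          have hlen' : h.length = pos + u.length + 1 := by simpa using hlen
          have hpos' : min (pos + u.length + 1 + 2) h.length = pos + u.length + 1 := by omega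
          rw [hpos']
          obtain ⟨H1, H2⟩ := ih h (pos + u.length + 1) (pos + u.length + 1)
            (segs ++ [sliceNN h start (pos + u.length)]) le_rfl (by omega) (by omega)
            (by rw [hvdrop]; rfl)
          refine ⟨?_, ?_⟩
          · rw [H1, hvdrop]
            rw [htuv]
            rw [insideSplit_append_nodelim u _ hu]
            simp [hslice, hBs]
          · rw [H2, hvdrop, htuv, insideSplit_append_nodelim u _ hu]
            simp
        | [d2], hvdrop, _, hlen =>
          have hlen' : h.length = pos + u.length + 2 := by simpa using hlen
          have hpos' : min (pos + u.length + 1 + 2) h.length = pos + u.length + 2 := by omega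
          rw [hpos']
          obtain ⟨H1, H2⟩ := ih h (pos + u.length + 1) (pos + u.length + 2)
            (segs ++ [sliceNN h start (pos + u.length)]) (by omega) (by omega) (by omega)
            (by rw [show pos + u.length + 2 = h.length from by omega]; simp)
          refine ⟨?_, ?_⟩
          · rw [H1, hvdrop]
            rw [show pos + u.length + 2 = h.length from by omega, List.drop_length]
            rw [htuv, insideSplit_append_nodelim u _ hu]
            simp [hslice, hBs]
            omega
          · rw [H2]
            rw [show pos + u.length + 2 = h.length from by omega, List.drop_length]
            rw [htuv, insideSplit_append_nodelim u _ hu]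
            simp
        | d2 :: e :: r3, hvdrop, hdsv, hlen =>
          have hlen' : h.length = pos + u.length + 3 + r3.length := by simp at hlen; omega
          have hpos' : min (pos + u.length + 1 + 2) h.length = pos + u.length + 3 := by omega
          rw [hpos']
          have hrdrop : h.drop (pos + u.length + 3) = r3 := by
            rw [show pos + u.length + 3 = (pos + u.length + 1) + 2 from by omega,
              ← List.drop_drop, hvdrop]
            rfl
          have he : (e == '"' || e == '\\') = false ∧ dscan (e :: r3) true = false := by
            rw [dscan_true_bs_cons] at hdsv
            constructor
            · by_cases hc : (e == '"' || e == '\\') = true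
              · rw [hc] at hdsv; simp at hdsv
              · simpa using hc
            · by_cases hc : dscan (e :: r3) true = true
              · rw [hc] at hdsv; simp at hdsv
              · simpa using hc
          have he1 : e ≠ '"' := by
            intro hcc; subst hcc; simp at he
          have he2 : e ≠ '\\' := by
            intro hcc; subst hcc; simp at he
          have hds3 : dscan r3 true = false := by
            rw [← dscan_true_other e r3 he1 he2]
            exact he.2
          obtain ⟨H1, H2⟩ := ih h (pos + u.length + 1) (pos + u.length + 3)
            (segs ++ [sliceNN h start (pos + u.length)]) (by omega) (by omega) (by omega)
            (by rw [hrdrop]; exact hds3)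
          have hins : insideSplit (h.drop pos)
              = (u ++ d2 :: e :: (insideSplit r3).1, (insideSplit r3).2) := by
            rw [htuv, insideSplit_append_nodelim u _ hu, insideSplit_bs_cons,
              insideSplit_other e r3 he1 he2]
          refine ⟨?_, ?_⟩
          · rw [H1, hvdrop, hrdrop, hins]
            simp [hslice, hBs]
          · rw [H2, hrdrop, hins]

-- quote-free prefixes pass through the outer scan unchanged
def NoQuote (u : List Char) : Prop := ∀ c ∈ u, c ≠ '"'

theorem oScan_append_noquote : ∀ (u v : List Char), NoQuote u → oScan (u ++ v) = u ++ oScan v := by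
  intro u
  induction u with
  | nil => intro v _; simp
  | cons c u ih =>
    intro v hnq
    have hc := hnq c (by simp)
    rw [List.cons_append, oScan, if_neg hc, ih v (fun x hx => hnq x (by simp [hx]))]
    simp

theorem oScan_noquote : ∀ (u : List Char), NoQuote u → oScan u = u := by
  intro u hu
  have := oScan_append_noquote u [] hu
  simpa [oScan] using this

theorem dscan_false_append_noquote : ∀ (u v : List Char), NoQuote u →
    dscan (u ++ v) false = dscan v false := by
  intro u
  induction u with
  | nil => intro v _; simp
  | cons c u ih =>
    intro v hnq
    have hc := hnq c (by simp)
    rw [List.cons_append, dscan_false_cons, if_neg hc, ih v (fun x hx => hnq x (by simp [hx]))]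

-- once a quoted section is consumed, its remainder still contains no skipped escape
theorem dscan_insideSplit : ∀ (n : Nat) (l : List Char), l.length ≤ n → dscan l true = false →
    dscan (insideSplit l).2 false = false := by
  intro n
  induction n with
  | zero =>
    intro l h _
    have : l = [] := List.length_eq_zero_iff.mp (Nat.le_zero.mp h)
    subst this; simp
  | succ n ih =>
    intro l hl hd
    match l with
    | [] => simp
    | c :: r =>
      by_cases hq : c = '"'
      · subst hq
        rw [dscan_true_quote] at hd
        simpa using hd
      · by_cases hb : c = '\\'
        · subst hb
          match r with
          | [] => simp
          | [d2] => simp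
          | d2 :: e :: r3 =>
            rw [dscan_true_bs_cons] at hd
            have h2 : dscan (e :: r3) true = false := by
              by_cases hc : dscan (e :: r3) true = true
              · rw [hc] at hd; simp at hd
              · simpa using hc
            have := ih (e :: r3) (by simp at hl ⊢; omega) h2
            simpa using this
        · rw [dscan_true_other c r hq hb] at hd
          rw [insideSplit_other c r hq hb]
          exact ih r (by simp at hl; omega) hd

theorem outerA_nil (fuel : Nat) (segs : List (List Char)) : outerA fuel [] segs = segs := by
  cases fuel <;> simp [outerA]

theorem outer_spec : ∀ (fuel : Nat) (h : List Char) (segs : List (List Char)), h.length < fuel →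
    dscan h false = false →
    (outerA fuel h segs).flatten = segs.flatten ++ oScan h := by
  intro fuel
  induction fuel with
  | zero => intro h segs hf _; omega
  | succ n ih =>
    intro h segs hf hd
    by_cases hh : h = []
    · subst hh; simp [outerA, oScan]
    · have hlp : 0 < h.length := List.length_pos_iff.mpr hh
      by_cases hi : h.findIdx (· == '"') < h.length
      · -- a quote is found: h = take i ++ '"' :: rest
        set i := h.findIdx (· == '"') with hidef
        have hpart : partQuote h = (h.take i, h.drop (i + 1)) := by
          simp only [partQuote, ← hidef, if_pos hi]
        simp only [outerA, if_neg hh, hpart]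
        have hgi : h[i] = '"' := by
          have := List.findIdx_getElem (w := hi)
          simpa using this
        have hdecomp : h = h.take i ++ '"' :: h.drop (i + 1) := by
          conv_lhs => rw [← List.take_append_drop i h]
          rw [List.drop_eq_getElem_cons hi, hgi]
        have hnq : NoQuote (h.take i) := by
          intro c hc
          obtain ⟨j, hj, rfl⟩ := List.mem_iff_getElem.mp hc
          have hj' : j < i := by
            have := hj; simp at this; omega
          have := List.not_of_lt_findIdx (p := (· == '"')) (xs := h) (by omega)
          rw [List.getElem_take]
          simpa using this
        have hd2 : dscan (h.drop (i + 1)) true = false := by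
          have e1 := dscan_false_append_noquote (h.take i) ('"' :: h.drop (i + 1)) hnq
          rw [hdecomp, e1, dscan_false_cons, if_pos rfl] at hd
          exact hd
        obtain ⟨H1, H2⟩ := inner_spec ((h.drop (i + 1)).length + 2) (h.drop (i + 1)) 0 0
          (segs ++ [h.take i]) le_rfl (Nat.zero_le _) (by omega) hd2
        rw [List.drop_zero] at H1 H2
        rw [H2]
        have hlen2 : (insideSplit (h.drop (i + 1))).2.length < n := by
          have := insideSplit_len (h.drop (i + 1))
          simp at this ⊢
          omega
        have hd3 := dscan_insideSplit (h.drop (i + 1)).length (h.drop (i + 1)) le_rfl hd2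
        rw [ih _ _ hlen2 hd3, H1]
        conv_rhs => rw [hdecomp, oScan_append_noquote _ _ hnq, oScan]
        simp
      · -- no quote in h at all
        have hnq : NoQuote h := by
          intro c hc
          have hlen : h.findIdx (· == '"') = h.length :=
            Nat.le_antisymm List.findIdx_le_length (Nat.le_of_not_lt hi)
          have := List.findIdx_eq_length.mp hlen c hc
          simpa using this
        have hpart : partQuote h = (h, []) := by
          simp only [partQuote, if_neg hi]
        simp only [outerA, if_neg hh, hpart]
        have hinner : ∀ X : List (List Char), innerA [] (List.length ([] : List Char) + 2) 0 0 X = (X, 0, 0) := by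
          intro X; rfl
        rw [hinner]
        simp only [List.drop_nil]
        rw [outerA_nil]
        rw [oScan_noquote h hnq]
        simp [sliceNN]

-- ===== VERDICT (by name: the statement is the Claim_ definition above) =====
theorem header_unquote_spec : Claim_unchanged_header_unquote := by
  intro header _ hnd
  have hd : dscan header.toList false = false := by
    unfold D_header_unquote at hnd
    exact Bool.eq_false_iff.mpr (fun h => hnd h)
  unfold header_unquote header_unquote_alt
  rw [foldl_stepB, scanS_outside header.toList.length _ le_rfl,
    outer_spec (header.toList.length + 1) _ _ (by omega) hd]
  
  simp

theorem header_unquote_changed : Claim_changed_header_unquote := by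
  unfold Claim_changed_header_unquote; decide
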